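-- pv_equiv track=rewrite | github.com/didacfibla/AdventOfCode | 2023/4/main.py | win_card
-- ===== SOURCE A (Python) =====
-- def win_card(game: dict, card: int) -> list[int]:
--     cards_winned = []
--     intersection_set = game[card][0].intersection(game[card][1])
--     new_card = card
--     for _ in intersection_set:
--         new_card += 1
--         cards_winned.append(new_card)
--
--     return cards_winned
-- ===== SOURCE B (Python) =====
-- def _consec(start, n):
--     # recursively build the n consecutive ints starting at start
--     if n == 0:
--         return []
--     return [start] + _consec(start + 1, n - 1)
--
--
-- def win_card(game: dict, card: int) -> list[int]:
--     winning, have = game[card][0], game[card][1]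
--     k = sum(1 for w in winning if w in have)
--     return _consec(card + 1, k)
-- ===== Notes on version B (the rewrite author's own statement) =====
-- stated objective: alternative
-- what changed: B never builds the intersection set: it counts matches with a single membership-test pass (sum of a generator) over the winning numbers and then builds the consecutive card ids by a recursive helper instead of an accumulator loop.
-- outside the precondition, e.g. on win_card({}, 0): A raises KeyError, B raises KeyError
import Mathlib
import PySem

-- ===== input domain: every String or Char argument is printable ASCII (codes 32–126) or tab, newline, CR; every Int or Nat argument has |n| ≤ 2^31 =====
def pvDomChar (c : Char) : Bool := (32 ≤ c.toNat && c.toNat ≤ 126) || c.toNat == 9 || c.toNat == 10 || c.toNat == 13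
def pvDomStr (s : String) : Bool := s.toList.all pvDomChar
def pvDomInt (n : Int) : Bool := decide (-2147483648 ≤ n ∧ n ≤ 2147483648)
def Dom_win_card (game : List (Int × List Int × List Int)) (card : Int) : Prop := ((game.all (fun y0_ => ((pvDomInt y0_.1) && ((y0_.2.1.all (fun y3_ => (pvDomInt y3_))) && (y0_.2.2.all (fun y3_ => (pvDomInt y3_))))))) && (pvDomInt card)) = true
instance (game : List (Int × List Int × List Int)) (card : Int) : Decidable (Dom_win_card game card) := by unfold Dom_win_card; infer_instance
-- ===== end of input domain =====

-- B changes: no intersection set and no accumulator loop — matches are counted by one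
-- membership-test pass over the winning numbers and the consecutive ids are built by a
-- recursive helper (objective: alternative).

-- ===== PORT A =====
-- game[card] is a dict lookup (first match under the assoc-list convention); the sets are
-- modelled with PySem.Set (iteration over the intersection only counts, so order-independent).
def win_card (game : List (Int × List Int × List Int)) (card : Int) : List Int :=
  match game.lookup card with
  | none => []   -- KeyError; excluded by Pre_win_card
  | some (s0, s1) =>
    let intersection_set : PySem.Set Int := PySem.Set.inter (PySem.Set.ofList s0) s1
    let st := intersection_set.foldl
      (fun (st : List Int × Int) _ => (st.1 ++ [st.2 + 1], st.2 + 1)) ([], card)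
    st.1

-- ===== PORT B =====
-- _consec start n = [start] + _consec (start+1) (n-1), the recursive builder of Source B
def consecB : Int → Nat → List Int
  | _, 0 => []
  | start, n + 1 => start :: consecB (start + 1) n

def win_card_alt (game : List (Int × List Int × List Int)) (card : Int) : List Int :=
  match game.lookup card with
  | none => []   -- KeyError; excluded by Pre_win_card
  | some (s0, s1) =>
    let winning : PySem.Set Int := PySem.Set.ofList s0
    let haveS : PySem.Set Int := PySem.Set.ofList s1
    -- k = sum(1 for w in winning if w in have): one counting pass, order-independent
    let k : Nat := winning.foldl (fun n w => if PySem.Set.contains haveS w then n + 1 else n) 0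
    consecB (card + 1) k

-- ===== PRECONDITION & SPEC =====
-- Pre_ excludes exactly the inputs where 'card' is not a key of the dict (Python KeyError).
def Pre_win_card (game : List (Int × List Int × List Int)) (card : Int) : Prop :=
  (game.lookup card).isSome = true
instance (game : List (Int × List Int × List Int)) (card : Int) : Decidable (Pre_win_card game card) := by unfold Pre_win_card; infer_instance
def pvWitness_win_card : (List (Int × List Int × List Int)) × Int := ([(3, [1, 2, 5], [2, 5, 9])], 3)
def Spec_win_card (game : List (Int × List Int × List Int)) (card : Int) (out : List Int) : Prop := out = win_card_alt game card
instance (game : List (Int × List Int × List Int)) (card : Int) (out : List Int) : Decidable (Spec_win_card game card out) := by unfold Spec_win_card; infer_instance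

-- ===== CLAIM (what is proved, stated in full; the proofs are below) =====
def Claim_equal_win_card : Prop := ∀ (game : List (Int × List Int × List Int)) (card : Int), Dom_win_card game card → Pre_win_card game card → Spec_win_card game card (win_card game card)

-- ===== LEMMAS AND PROOFS =====

-- A's loop, run over any list of length n, appends exactly the n consecutive ids after c.
theorem win_card_loop (l : List Int) (acc : List Int) (c : Int) :
    l.foldl (fun (st : List Int × Int) _ => (st.1 ++ [st.2 + 1], st.2 + 1)) (acc, c)
      = (acc ++ consecB (c + 1) l.length, c + l.length) := by
  induction l generalizing acc c with
  | nil => simp [consecB]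
  | cons x t ih =>
    simp only [List.foldl_cons, ih (acc ++ [c + 1]) (c + 1), List.length_cons, consecB,
      List.append_assoc, List.singleton_append, Prod.mk.injEq]
    constructor
    · trivial
    · push_cast; ring

-- B's counting fold is the length of the corresponding filter.
theorem count_fold_eq_filter_length (l : List Int) (p : Int → Bool) (n : Nat) :
    l.foldl (fun n w => if p w then n + 1 else n) n = n + (l.filter p).length := by
  induction l generalizing n with
  | nil => simp
  | cons x t ih => by_cases h : p x <;> simp [h, ih] <;> try omega

-- contains on ofList s1 agrees with contains on s1.
theorem contains_ofList (s1 : List Int) (w : Int) :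
    PySem.Set.contains (PySem.Set.ofList s1) w = s1.contains w := by
  refine Bool.eq_iff_iff.mpr ?_
  simp [PySem.Set.mem_ofList]

-- ===== VERDICT (by name: the statement is the Claim_ definition above) =====
theorem win_card_spec : Claim_equal_win_card := by
  intro game card _ _
  unfold Spec_win_card win_card win_card_alt
  cases h : game.lookup card with
  | none => rfl
  | some v =>
    obtain ⟨s0, s1⟩ := v
    simp only [win_card_loop, count_fold_eq_filter_length, Nat.zero_add]
    have : PySem.Set.inter (PySem.Set.ofList s0) s1
        = (PySem.Set.ofList s0).filter (fun w => PySem.Set.contains (PySem.Set.ofList s1) w) := by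
      show (PySem.Set.ofList s0).filter _ = _
      exact List.filter_congr (fun w _ => (contains_ofList s1 w).symm)
    rw [this]
    rfl
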